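-- pv_equiv track=rewrite | github.com/ShuoYin03/wine_admin | wine_spider/wine_spider/run_spiders.py | _expand_csv_values
-- ===== SOURCE A (Python) =====
-- def _expand_csv_values(raw_values: list[str]) -> list[str]:
-- 	tokens: list[str] = []
-- 	for raw in raw_values:
-- 		for chunk in raw.split(","):
-- 			candidate = chunk.strip()
-- 			if candidate:
-- 				tokens.append(candidate)
-- 	return tokens
-- ===== SOURCE B (Python) =====
-- def _expand_csv_values(raw_values: list[str]) -> list[str]:
--     # Single-pass character scanner: no split(), no strip().  For each input
--     # string we scan its characters once (with a trailing ',' sentinel),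
--     # building the current token already stripped: leading whitespace is
--     # skipped, interior whitespace is buffered in `pend` and only committed
--     # when a further non-space character arrives, so trailing whitespace is
--     # never part of the token; ',' emits the token if non-empty.
--     tokens: list[str] = []
--     for raw in raw_values:
--         cur: list[str] = []
--         pend: list[str] = []
--         for ch in raw + ",":
--             if ch == ",":
--                 if cur:
--                     tokens.append("".join(cur))
--                 cur = []
--                 pend = []
--             elif ch.isspace():
--                 if cur:
--                     pend.append(ch)
--             else:
--                 cur.extend(pend)
--                 pend = []
--                 cur.append(ch)
--     return tokens
-- ===== Notes on version B (the rewrite author's own statement) =====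
-- stated objective: alternative
-- what changed: B replaces A's split(',')-then-strip pipeline by a single-pass character-level scanner per string: it walks the characters once, skips leading whitespace, buffers interior whitespace in a pending list committed only when a further non-space character arrives, and emits the already-stripped token when it hits a comma (a sentinel ',' flushes the last token), so no split, strip or intermediate chunk lists are ever built.
import Mathlib
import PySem

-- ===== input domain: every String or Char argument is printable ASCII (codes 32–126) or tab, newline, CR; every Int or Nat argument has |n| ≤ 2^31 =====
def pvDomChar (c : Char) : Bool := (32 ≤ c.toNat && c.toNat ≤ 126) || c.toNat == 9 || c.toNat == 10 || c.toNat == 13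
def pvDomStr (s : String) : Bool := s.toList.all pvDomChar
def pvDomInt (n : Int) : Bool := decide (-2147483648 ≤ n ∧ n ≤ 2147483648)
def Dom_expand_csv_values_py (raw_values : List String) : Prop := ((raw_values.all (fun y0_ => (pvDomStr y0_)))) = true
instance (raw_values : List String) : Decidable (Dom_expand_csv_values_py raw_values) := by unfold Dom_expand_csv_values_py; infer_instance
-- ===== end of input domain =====

-- B replaces A's split/strip pipeline by a single-pass character scanner that emits already-stripped tokens; return values proved equal.

-- ===== PORT A =====
-- literal transliteration of A's nested loops with a tokens accumulator
def expand_csv_values_py (raw_values : List String) : List String :=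
  raw_values.foldl (fun tokens raw =>
    (PySem.Chars.splitOn raw.toList [',']).foldl (fun tokens chunk =>
      let candidate := PySem.Chars.strip chunk
      if !candidate.isEmpty then tokens ++ [String.ofList candidate] else tokens) tokens) []

-- ===== PORT B =====
-- the body of Source B's inner character loop, named so the proofs can speak about it
-- state = (tokens, cur, pend), exactly Source B's three variables
def pvScanStep (st : List String × List Char × List Char) (ch : Char) :
    List String × List Char × List Char :=
  if ch = ',' then
    (if !st.2.1.isEmpty then st.1 ++ [String.ofList st.2.1] else st.1, [], [])
  else if PySem.Chars.isspace ch then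
    (st.1, st.2.1, if !st.2.1.isEmpty then st.2.2 ++ [ch] else st.2.2)
  else
    (st.1, st.2.1 ++ st.2.2 ++ [ch], [])

-- literal transliteration of Source B: per string, scan raw + "," character by character
def expand_csv_values_py_alt (raw_values : List String) : List String :=
  raw_values.foldl (fun tokens raw =>
    ((raw.toList ++ [',']).foldl pvScanStep (tokens, [], [])).1) []

-- ===== PRECONDITION & SPEC =====
def Spec_expand_csv_values_py (raw_values : List String) (out : List String) : Prop := out = expand_csv_values_py_alt raw_values
instance (raw_values : List String) (out : List String) : Decidable (Spec_expand_csv_values_py raw_values out) := by unfold Spec_expand_csv_values_py; infer_instance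

-- ===== CLAIM (what is proved, stated in full; the proofs are below) =====
def Claim_equal_expand_csv_values_py : Prop := ∀ (raw_values : List String), Dom_expand_csv_values_py raw_values → Spec_expand_csv_values_py raw_values (expand_csv_values_py raw_values)

-- ===== LEMMAS AND PROOFS =====

-- a direct structural model of splitting on the single character ','
def pvConsHead (p : List Char) : List (List Char) → List (List Char)
  | [] => [p]
  | h :: t => (p ++ h) :: t

def pvSplit : List Char → List (List Char)
  | [] => [[]]
  | c :: rest => if c = ',' then [] :: pvSplit rest else pvConsHead [c] (pvSplit rest)

theorem pvSplit_ne_nil (l : List Char) : pvSplit l ≠ [] := by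
  cases l with
  | nil => simp [pvSplit]
  | cons c rest =>
    simp only [pvSplit]
    split
    · simp
    · cases h : pvSplit rest <;> simp [pvConsHead]

theorem pvConsHead_consHead (a b : List Char) (x : List (List Char)) :
    pvConsHead a (pvConsHead b x) = pvConsHead (a ++ b) x := by
  cases x <;> simp [pvConsHead]

theorem pv_go_eq (fuel : Nat) (l cur : List Char) (acc : List (List Char))
    (h : l.length ≤ fuel) :
    PySem.Chars.splitOn.go [','] fuel l cur acc =
      acc.reverse ++ pvConsHead cur.reverse (pvSplit l) := by
  induction fuel generalizing l cur acc with
  | zero =>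
    have : l = [] := List.length_eq_zero_iff.mp (Nat.le_zero.mp h)
    subst this
    simp [PySem.Chars.splitOn.go, pvSplit, pvConsHead]
  | succ fuel ih =>
    cases l with
    | nil => simp [PySem.Chars.splitOn.go, pvSplit, pvConsHead]
    | cons c rest =>
      simp only [PySem.Chars.splitOn.go]
      by_cases hc : c = ','
      · subst hc
        have hp : [','].isPrefixOf (',' :: rest) = true := by simp [List.isPrefixOf]
        rw [if_pos hp]
        rw [show List.drop [','].length (',' :: rest) = rest from rfl]
        simp only [List.length_cons, Nat.succ_le_succ_iff] at h
        rw [ih rest [] (cur.reverse :: acc) h]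
        have hne := pvSplit_ne_nil rest
        cases hs : pvSplit rest with
        | nil => exact absurd hs hne
        | cons sh st => simp [pvSplit, pvConsHead, hs]
      · have hp : [','].isPrefixOf (c :: rest) = false := by
          simp only [List.isPrefixOf, Bool.and_eq_false_iff, beq_eq_false_iff_ne, ne_eq]
          exact Or.inl fun h' => hc h'.symm
        rw [if_neg (by simp [hp])]
        simp only [List.length_cons, Nat.succ_le_succ_iff] at h
        rw [ih rest (c :: cur) acc h]
        rw [show (c :: cur).reverse = cur.reverse ++ [c] by simp]
        rw [← pvConsHead_consHead]
        simp [pvSplit, hc]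

theorem pv_splitOn_eq (l : List Char) : PySem.Chars.splitOn l [','] = pvSplit l := by
  have := pv_go_eq (l.length + 1) l [] [] (Nat.le_succ _)
  simpa [PySem.Chars.splitOn, pvConsHead_consHead, pvConsHead,
    (pvSplit_ne_nil l)] using
    (by
      rw [PySem.Chars.splitOn, this]
      cases hs : pvSplit l with
      | nil => exact absurd hs (pvSplit_ne_nil l)
      | cons h t => simp [pvConsHead] : PySem.Chars.splitOn l [','] = pvSplit l)

-- the strip/filter/stringify reading of a chunk list (A's inner loop produces it)
def pvTok (chunks : List (List Char)) : List String :=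
  ((chunks.map PySem.Chars.strip).filter (fun c => !c.isEmpty)).map String.ofList

-- A's inner loop appends exactly pvTok of the chunks
theorem pv_inner (chunks : List (List Char)) (tokens : List String) :
    chunks.foldl (fun tokens chunk =>
      let candidate := PySem.Chars.strip chunk
      if !candidate.isEmpty then tokens ++ [String.ofList candidate] else tokens) tokens
    = tokens ++ pvTok chunks := by
  induction chunks generalizing tokens with
  | nil => simp [pvTok]
  | cons ch rest ih =>
    simp only [List.foldl_cons, ih]
    by_cases h : (PySem.Chars.strip ch).isEmpty = true <;>
      simp [pvTok, h]

-- appending folds concatenate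
theorem pv_foldl_flatMap (g : String → List String) (l : List String) (init : List String) :
    l.foldl (fun acc x => acc ++ g x) init = init ++ l.flatMap g := by
  induction l generalizing init with
  | nil => simp
  | cons x xs ih => simp [ih]

-- A's outer loop is the concatenation of per-element tokens
theorem pv_A_eq (raw_values : List String) :
    expand_csv_values_py raw_values
      = raw_values.flatMap (fun raw => pvTok (pvSplit raw.toList)) := by
  unfold expand_csv_values_py
  have hf : (fun (tokens : List String) (raw : String) =>
      (PySem.Chars.splitOn raw.toList [',']).foldl (fun tokens chunk =>
        let candidate := PySem.Chars.strip chunk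
        if !candidate.isEmpty then tokens ++ [String.ofList candidate] else tokens) tokens)
      = fun tokens raw => tokens ++ pvTok (pvSplit raw.toList) := by
    funext tokens raw
    rw [pv_splitOn_eq, pv_inner]
  rw [hf, pv_foldl_flatMap]
  simp

-- dropWhile helpers for strip
theorem pv_dropWhile_all {p : Char → Bool} (l m : List Char) (h : l.all p = true) :
    List.dropWhile p (l ++ m) = List.dropWhile p m := by
  induction l with
  | nil => simp
  | cons a t ih =>
    simp only [List.all_cons, Bool.and_eq_true] at h
    simp [h.1, ih h.2]

-- strip removes nothing from a list whose head and last are non-space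
theorem pv_strip_fix (cur pend : List Char)
    (hp : pend.all PySem.Chars.isspace = true)
    (hep : cur = [] → pend = [])
    (hh : ∀ x ∈ cur.head?, PySem.Chars.isspace x = false)
    (hl : ∀ x ∈ cur.getLast?, PySem.Chars.isspace x = false) :
    PySem.Chars.strip (cur ++ pend) = cur := by
  cases cur with
  | nil => simp [hep rfl, PySem.Chars.strip, PySem.Chars.lstrip, PySem.Chars.rstrip]
  | cons a t =>
    have ha : PySem.Chars.isspace a = false := hh a (by simp)
    have hlast : ∀ x ∈ (a :: t).reverse.head?, PySem.Chars.isspace x = false := by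
      intro x hx
      rw [List.head?_reverse] at hx
      exact hl x hx
    have h2 : List.dropWhile PySem.Chars.isspace (a :: t).reverse = (a :: t).reverse := by
      cases hr : (a :: t).reverse with
      | nil => simp
      | cons b u =>
        have hb : PySem.Chars.isspace b = false := by
          apply hlast; rw [hr]; simp
        simp [hb]
    unfold PySem.Chars.strip PySem.Chars.lstrip PySem.Chars.rstrip
    rw [List.cons_append, List.dropWhile_cons_of_neg (by simp [ha])]
    rw [show (a :: (t ++ pend)).reverse = pend.reverse ++ (a :: t).reverse from by simp]
    rw [pv_dropWhile_all _ _ (by simpa using hp), h2, List.reverse_reverse]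

-- a leading space disappears under strip
theorem pv_strip_cons_ws (c : Char) (l : List Char) (hc : PySem.Chars.isspace c = true) :
    PySem.Chars.strip (c :: l) = PySem.Chars.strip l := by
  unfold PySem.Chars.strip PySem.Chars.lstrip
  rw [List.dropWhile_cons_of_pos hc]

-- B's scanner, run over l ++ [','], emits pvTok of the chunks of l with (cur ++ pend)
-- glued onto the first chunk — the loop invariant of Source B's inner loop
theorem pv_scan (l : List Char) : ∀ (cur pend : List Char) (tokens : List String),
    pend.all PySem.Chars.isspace = true → (cur = [] → pend = []) →
    (∀ x ∈ cur.head?, PySem.Chars.isspace x = false) →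
    (∀ x ∈ cur.getLast?, PySem.Chars.isspace x = false) →
    ((l ++ [',']).foldl pvScanStep (tokens, cur, pend)).1
      = tokens ++ pvTok (pvConsHead (cur ++ pend) (pvSplit l)) := by
  induction l with
  | nil =>
    intro cur pend tokens hp hep hh hl
    have h1 : ([] ++ [',']).foldl pvScanStep (tokens, cur, pend)
        = ((if !cur.isEmpty then tokens ++ [String.ofList cur] else tokens), [], []) := by
      simp [pvScanStep]
    rw [h1]
    simp only []
    rw [show pvSplit [] = [[]] from rfl]
    simp only [pvConsHead, List.append_nil]
    rw [show pvTok [cur ++ pend] =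
        (if !(PySem.Chars.strip (cur ++ pend)).isEmpty
         then [String.ofList (PySem.Chars.strip (cur ++ pend))] else []) from by
      by_cases h : (PySem.Chars.strip (cur ++ pend)).isEmpty = true <;> simp [pvTok, h]]
    rw [pv_strip_fix cur pend hp hep hh hl]
    cases cur <;> simp
  | cons c rest ih =>
    intro cur pend tokens hp hep hh hl
    by_cases hc : c = ','
    · subst hc
      have h1 : ((',' :: rest) ++ [',']).foldl pvScanStep (tokens, cur, pend)
          = (rest ++ [',']).foldl pvScanStep
            ((if !cur.isEmpty then tokens ++ [String.ofList cur] else tokens), [], []) := by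
        simp [pvScanStep]
      rw [h1, ih [] [] _ (by simp) (fun _ => rfl) (by simp) (by simp)]
      obtain ⟨sh, st, hs⟩ : ∃ sh st, pvSplit rest = sh :: st := by
        cases h : pvSplit rest with
        | nil => exact absurd h (pvSplit_ne_nil rest)
        | cons a b => exact ⟨a, b, rfl⟩
      rw [show pvSplit (',' :: rest) = [] :: pvSplit rest from by simp [pvSplit]]
      rw [hs]
      simp only [pvConsHead, List.nil_append, List.append_nil]
      rw [show pvTok ((cur ++ pend) :: sh :: st)
          = (if !(PySem.Chars.strip (cur ++ pend)).isEmpty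
             then [String.ofList (PySem.Chars.strip (cur ++ pend))] else [])
            ++ pvTok (sh :: st) from by
        by_cases h : (PySem.Chars.strip (cur ++ pend)).isEmpty = true <;> simp [pvTok, h]]
      rw [pv_strip_fix cur pend hp hep hh hl]
      cases cur <;> simp
    · have hsplit : pvSplit (c :: rest) = pvConsHead [c] (pvSplit rest) := by
        simp [pvSplit, hc]
      by_cases hw : PySem.Chars.isspace c = true
      · cases cur with
        | nil =>
          have hpe : pend = [] := hep rfl
          subst hpe
          have h1 : ((c :: rest) ++ [',']).foldl pvScanStep (tokens, [], [])
              = (rest ++ [',']).foldl pvScanStep (tokens, [], []) := by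
            simp [pvScanStep, hc, hw]
          rw [h1, ih [] [] _ (by simp) (fun _ => rfl) (by simp) (by simp)]
          rw [hsplit]
          obtain ⟨sh, st, hs⟩ : ∃ sh st, pvSplit rest = sh :: st := by
            cases h : pvSplit rest with
            | nil => exact absurd h (pvSplit_ne_nil rest)
            | cons a b => exact ⟨a, b, rfl⟩
          rw [hs]
          simp only [pvConsHead, List.nil_append, pvTok, List.map_cons]
          rw [show PySem.Chars.strip ([c] ++ sh) = PySem.Chars.strip sh from
            pv_strip_cons_ws c sh hw]
        | cons a t =>
          have h1 : ((c :: rest) ++ [',']).foldl pvScanStep (tokens, a :: t, pend)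
              = (rest ++ [',']).foldl pvScanStep (tokens, a :: t, pend ++ [c]) := by
            simp [pvScanStep, hc, hw]
          rw [h1, ih (a :: t) (pend ++ [c]) _ (by simp [List.all_append, hp, hw])
            (by simp) hh hl]
          rw [hsplit, pvConsHead_consHead]
          simp
      · have hw' : PySem.Chars.isspace c = false := by
          cases h : PySem.Chars.isspace c
          · rfl
          · exact absurd h hw
        have h1 : ((c :: rest) ++ [',']).foldl pvScanStep (tokens, cur, pend)
            = (rest ++ [',']).foldl pvScanStep (tokens, cur ++ pend ++ [c], []) := by
          simp [pvScanStep, hc, hw]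
        rw [h1, ih (cur ++ pend ++ [c]) [] _ (by simp) (by simp) ?_ ?_]
        · rw [hsplit, pvConsHead_consHead]
          simp
        · intro x hx
          cases cur with
          | nil =>
            have hpe : pend = [] := hep rfl
            subst hpe
            simp at hx
            subst hx
            exact hw'
          | cons a t =>
            simp at hx
            subst hx
            exact hh a (by simp)
        · intro x hx
          rw [List.getLast?_concat] at hx
          simp at hx
          subst hx
          exact hw'

-- B's outer loop is the same concatenation of per-element tokens
theorem pv_B_eq (raw_values : List String) :
    expand_csv_values_py_alt raw_values
      = raw_values.flatMap (fun raw => pvTok (pvSplit raw.toList)) := by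
  unfold expand_csv_values_py_alt
  have hf : (fun (tokens : List String) (raw : String) =>
      ((raw.toList ++ [',']).foldl pvScanStep (tokens, [], [])).1)
      = fun tokens raw => tokens ++ pvTok (pvSplit raw.toList) := by
    funext tokens raw
    rw [pv_scan raw.toList [] [] tokens (by simp) (fun _ => rfl) (by simp) (by simp)]
    obtain ⟨sh, st, hs⟩ : ∃ sh st, pvSplit raw.toList = sh :: st := by
      cases h : pvSplit raw.toList with
      | nil => exact absurd h (pvSplit_ne_nil raw.toList)
      | cons a b => exact ⟨a, b, rfl⟩
    rw [hs]
    simp [pvConsHead]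
  rw [hf, pv_foldl_flatMap]
  simp

-- ===== VERDICT (by name: the statement is the Claim_ definition above) =====
theorem expand_csv_values_py_spec : Claim_equal_expand_csv_values_py := by
  intro raw_values _
  unfold Spec_expand_csv_values_py
  rw [pv_A_eq, pv_B_eq]
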